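-- pv_equiv track=rewrite | github.com/manas-17045/LeetcodeSolutions | Leetcode 3701-3800/3768/3768.py | minInversionCount
-- ===== SOURCE A (Python) =====
-- def minInversionCount(nums: list[int], k: int) -> int:
--     """
--     Calculates the minimum inversion count among all subarrays of a fixed length k.
--
--     Args:
--         nums: A list of integers.
--         k: The fixed length of the subarrays.
--     Returns:
--         The minimum inversion count found.
--     """
--     n = len(nums)
--     sortedUnique = sorted(set(nums))
--     rankMap = {val: i + 1 for i, val in enumerate(sortedUnique)}
--     m = len(sortedUnique)
--     ranks = [rankMap[x] for x in nums]
--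
--     bit = [0] * (m + 1)
--
--     def update(index, delta):
--         while index <= m:
--             bit[index] += delta
--             index += index & (-index)
--
--     def query(index):
--         total = 0
--         while index > 0:
--             total += bit[index]
--             index -= index & (-index)
--         return total
--
--     currentInversions = 0
--     for i in range(k):
--         rank = ranks[i]
--         currentInversions += (i - query(rank))
--         update(rank, 1)
--
--     minInversions = currentInversions
--
--     for i in range(k, n):
--         outRank = ranks[i - k]
--         inRank = ranks[i]
--
--         currentInversions -= query(outRank - 1)
--         update(outRank, -1)
--
--         currentInversions += (k - 1 - query(inRank))
--         update(inRank, 1)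
--
--         if currentInversions < minInversions:
--             minInversions = currentInversions
--
--     return minInversions
-- ===== SOURCE B (Python) =====
-- def minInversionCount(nums: list[int], k: int) -> int:
--     """Brute force: recompute each window's inversion count by a direct pair scan,
--     take the minimum over all window starts."""
--     n = len(nums)
--
--     def window_inversions(s):
--         return sum(1 for i in range(s, s + k)
--                      for j in range(i + 1, s + k)
--                      if nums[i] > nums[j])
--
--     return min(window_inversions(s) for s in range(n - k + 1))
-- ===== Notes on version B (the rewrite author's own statement) =====
-- stated objective: simpler
-- what changed: Replaces the Fenwick tree with coordinate compression and incremental sliding-window maintenance by a direct brute-force rescan: each window's inversions are counted by a plain double loop over pairs and the minimum is taken over all windows.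
import Mathlib
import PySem

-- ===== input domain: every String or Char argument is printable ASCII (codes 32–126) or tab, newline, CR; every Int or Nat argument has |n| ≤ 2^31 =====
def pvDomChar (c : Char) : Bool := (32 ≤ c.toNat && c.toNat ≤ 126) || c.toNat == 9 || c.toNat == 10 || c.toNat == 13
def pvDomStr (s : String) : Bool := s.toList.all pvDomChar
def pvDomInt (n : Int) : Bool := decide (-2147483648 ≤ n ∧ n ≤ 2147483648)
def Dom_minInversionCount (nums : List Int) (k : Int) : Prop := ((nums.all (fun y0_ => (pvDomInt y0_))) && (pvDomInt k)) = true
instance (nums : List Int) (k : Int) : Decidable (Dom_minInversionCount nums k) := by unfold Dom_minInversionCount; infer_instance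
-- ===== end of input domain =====

-- B replaces A's Fenwick-tree sliding-window maintenance by a plain per-window
-- double-loop rescan (simpler, not faster).

-- ===== PORT A =====
-- while index <= m: bit[index] += delta; index += index & (-index)
-- (fuel only makes the loop total; it is never exhausted on the calls A makes)
def bitUpdateGo (m delta : Int) : Nat → Int → List Int → List Int
  | 0, _, bit => bit
  | fuel + 1, index, bit =>
    if index ≤ m then
      bitUpdateGo m delta fuel (index + PySem.Int.band index (-index))
        (PySem.List.pySetD bit index (PySem.List.pyGetD bit index 0 + delta))
    else bit

-- while index > 0: total += bit[index]; index -= index & (-index)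
def bitQueryGo (bit : List Int) : Nat → Int → Int → Int
  | 0, _, total => total
  | fuel + 1, index, total =>
    if 0 < index then
      bitQueryGo bit fuel (index - PySem.Int.band index (-index))
        (total + PySem.List.pyGetD bit index 0)
    else total

def minInversionCount (nums : List Int) (k : Int) : Int :=
  let n : Int := (nums.length : Int)
  let sortedUnique := PySem.List.sorted (PySem.Set.ofList nums) (fun x => x) false
  let rankMap : PySem.Dict Int Int :=
    (PySem.List.enumerate sortedUnique 0).foldl (fun d p => d.insert p.2 (p.1 + 1)) PySem.Dict.empty
  let m : Int := (sortedUnique.length : Int)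
  -- rankMap[x]: the key is always present (x ∈ nums ⊆ sortedUnique), so getD is exact
  let ranks := nums.map (fun x => rankMap.getD x 0)
  let bit0 : List Int := PySem.List.pyRepeat [0] (m + 1)
  -- bit[index] reads/writes are always in range on the calls A makes (1 ≤ index ≤ m)
  let st1 := (PySem.List.pyRange 0 k 1).foldl
    (fun (st : Int × List Int) i =>
      let rank := PySem.List.pyGetD ranks i 0
      (st.1 + (i - bitQueryGo st.2 rank.toNat rank 0),
       bitUpdateGo m 1 (m.toNat + 1) rank st.2))
    (0, bit0)
  let st2 := (PySem.List.pyRange k n 1).foldl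
    (fun (st : Int × Int × List Int) i =>
      let outRank := PySem.List.pyGetD ranks (i - k) 0
      let inRank := PySem.List.pyGetD ranks i 0
      let cur1 := st.1 - bitQueryGo st.2.2 (outRank - 1).toNat (outRank - 1) 0
      let bit1 := bitUpdateGo m (-1) (m.toNat + 1) outRank st.2.2
      let cur2 := cur1 + (k - 1 - bitQueryGo bit1 inRank.toNat inRank 0)
      let bit2 := bitUpdateGo m 1 (m.toNat + 1) inRank bit1
      (cur2, (if cur2 < st.2.1 then cur2 else st.2.1), bit2))
    (st1.1, st1.1, st1.2)
  st2.2.1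

-- ===== PORT B =====
-- sum(1 for i in range(s, s+k) for j in range(i+1, s+k) if nums[i] > nums[j])
def windowInv (nums : List Int) (k : Int) (s : Int) : Int :=
  ((PySem.List.pyRange s (s + k) 1).map (fun i =>
    ((PySem.List.pyRange (i + 1) (s + k) 1).map (fun j =>
      if PySem.List.pyGetD nums i 0 > PySem.List.pyGetD nums j 0 then (1 : Int) else 0)).sum)).sum

-- min(...) over the window starts; the range is nonempty whenever k ≤ n, so getD is exact
def minInversionCount_alt (nums : List Int) (k : Int) : Int :=
  let n : Int := (nums.length : Int)
  (PySem.List.min? ((PySem.List.pyRange 0 (n - k + 1) 1).map (fun s => windowInv nums k s))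
    (fun v => v)).getD 0

-- ===== PRECONDITION & SPEC =====
-- Pre_ excludes exactly the inputs on which the Python A raises IndexError:
-- k > len(nums) (ranks[i] in the first loop) and k < 0 (ranks[i - k] in the second).
def Pre_minInversionCount (nums : List Int) (k : Int) : Prop :=
  0 ≤ k ∧ k ≤ (nums.length : Int)
instance (nums : List Int) (k : Int) : Decidable (Pre_minInversionCount nums k) := by
  unfold Pre_minInversionCount; infer_instance

def pvWitness_minInversionCount : List Int × Int := ([3, 1, 2], 2)

def Spec_minInversionCount (nums : List Int) (k : Int) (out : Int) : Prop :=
  out = minInversionCount_alt nums k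
instance (nums : List Int) (k : Int) (out : Int) : Decidable (Spec_minInversionCount nums k out) := by
  unfold Spec_minInversionCount; infer_instance

-- ===== CLAIM (what is proved, stated in full; the proofs are below) =====
def Claim_equal_minInversionCount : Prop := ∀ (nums : List Int) (k : Int), Dom_minInversionCount nums k → Pre_minInversionCount nums k → Spec_minInversionCount nums k (minInversionCount nums k)

-- ===== LEMMAS AND PROOFS =====

-- ---- lowbit over ℕ ----

theorem land_oe (a b : ℕ) : (2*a+1) &&& (2*b) = 2*(a &&& b) := by
  have h := Nat.bitwise_bit (f := and) rfl true a false b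
  simpa [Nat.bit_val, Nat.mul_comm, HAnd.hAnd, AndOp.and, Nat.land] using h
theorem land_eo (a b : ℕ) : (2*a) &&& (2*b+1) = 2*(a &&& b) := by
  have h := Nat.bitwise_bit (f := and) rfl false a true b
  simpa [Nat.bit_val, Nat.mul_comm, HAnd.hAnd, AndOp.and, Nat.land] using h

def lbN : ℕ → ℕ
  | 0 => 0
  | n + 1 => if (n + 1) % 2 = 1 then 1 else 2 * lbN ((n + 1) / 2)
decreasing_by exact Nat.div_lt_self (Nat.succ_pos n) one_lt_two

theorem lbN_odd (n : ℕ) (h : n % 2 = 1) : lbN n = 1 := by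
  cases n with
  | zero => simp at h
  | succ m => rw [lbN, if_pos h]

theorem lbN_even (n : ℕ) (h0 : 0 < n) (h : n % 2 = 0) : lbN n = 2 * lbN (n / 2) := by
  cases n with
  | zero => simp at h0
  | succ m => rw [lbN, if_neg (by omega)]

theorem lbN_pos_le (n : ℕ) (h : 0 < n) : 0 < lbN n ∧ lbN n ≤ n := by
  induction n using Nat.strong_induction_on with
  | _ n ih =>
    rcases Nat.even_or_odd n with he | ho
    · have h2 : n % 2 = 0 := Nat.even_iff.mp he
      rw [lbN_even n h h2]
      have := ih (n / 2) (by omega) (by omega)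
      omega
    · rw [lbN_odd n (Nat.odd_iff.mp ho)]; omega

theorem land_pred (n : ℕ) (h : 0 < n) : n - (n &&& (n - 1)) = lbN n := by
  induction n using Nat.strong_induction_on with
  | _ n ih =>
    rcases Nat.even_or_odd n with he | ho
    · have h2 : n % 2 = 0 := Nat.even_iff.mp he
      obtain ⟨a, ha⟩ : ∃ a, n = 2 * a := ⟨n / 2, by omega⟩
      have ha0 : 0 < a := by omega
      have h3 : n / 2 = a := by omega
      rw [lbN_even n h h2, h3]
      subst ha
      have e1 : 2 * a - 1 = 2 * (a - 1) + 1 := by omega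
      rw [e1, land_eo]
      have := ih a (by omega) ha0
      have hle : a &&& (a - 1) ≤ a := Nat.and_le_left
      omega
    · have h1 : n % 2 = 1 := Nat.odd_iff.mp ho
      obtain ⟨a, ha⟩ : ∃ a, n = 2 * a + 1 := ⟨n / 2, by omega⟩
      rw [lbN_odd n h1]
      subst ha
      have e1 : 2 * a + 1 - 1 = 2 * a := by omega
      rw [e1, land_oe, Nat.and_self a]
      omega

theorem lbK1 (i : ℕ) : ∀ r : ℕ, 0 < r → r < i → i - lbN i < r → r + lbN r ≤ i := by
  induction i using Nat.strong_induction_on with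
  | _ i ih =>
    intro r hr hlt hc
    rcases Nat.even_or_odd r with hre | hro
    · rcases Nat.even_or_odd i with hie | hio
      · -- both even
        have hr2 : r % 2 = 0 := Nat.even_iff.mp hre
        have hi2 : i % 2 = 0 := Nat.even_iff.mp hie
        obtain ⟨a, ha⟩ : ∃ a, r = 2 * a := ⟨r / 2, by omega⟩
        obtain ⟨b, hb⟩ : ∃ b, i = 2 * b := ⟨i / 2, by omega⟩
        have ea : r / 2 = a := by omega
        have hlbr : lbN r = 2 * lbN a := by rw [lbN_even r hr hr2, ea]
        have eb : i / 2 = b := by omega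
        have hlbi : lbN i = 2 * lbN b := by rw [lbN_even i (by omega) hi2, eb]
        have hble : lbN b ≤ b := (lbN_pos_le b (by omega)).2
        have := ih b (by omega) a (by omega) (by omega) (by omega)
        omega
      · -- i odd
        have hlbi : lbN i = 1 := lbN_odd i (Nat.odd_iff.mp hio)
        omega
    · rw [lbN_odd r (Nat.odd_iff.mp hro)]; omega

theorem lbK2 (i : ℕ) : ∀ r : ℕ, 0 < r → r + lbN r ≤ i → i - lbN i < r + lbN r → i - lbN i < r := by
  induction i using Nat.strong_induction_on with
  | _ i ih =>
    intro r hr h1 h2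
    have hi0 : 0 < i := by have := (lbN_pos_le r hr).1; omega
    rcases Nat.even_or_odd r with hre | hro
    · rcases Nat.even_or_odd i with hie | hio
      · have hr2 : r % 2 = 0 := Nat.even_iff.mp hre
        have hi2 : i % 2 = 0 := Nat.even_iff.mp hie
        obtain ⟨a, ha⟩ : ∃ a, r = 2 * a := ⟨r / 2, by omega⟩
        obtain ⟨b, hb⟩ : ∃ b, i = 2 * b := ⟨i / 2, by omega⟩
        have ea : r / 2 = a := by omega
        have hlbr : lbN r = 2 * lbN a := by rw [lbN_even r hr hr2, ea]
        have eb : i / 2 = b := by omega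
        have hlbi : lbN i = 2 * lbN b := by rw [lbN_even i hi0 hi2, eb]
        have hble : lbN b ≤ b := (lbN_pos_le b (by omega)).2
        have hale : lbN a ≤ a := (lbN_pos_le a (by omega)).2
        have := ih b (by omega) a (by omega) (by omega) (by omega)
        omega
      · -- i odd: i = r + lbN r forced, parity contradiction
        have hlbi : lbN i = 1 := lbN_odd i (Nat.odd_iff.mp hio)
        have hr2 : r % 2 = 0 := Nat.even_iff.mp hre
        have hlbr2 : lbN r % 2 = 0 := by
          rw [lbN_even r hr hr2]; omega
        have hi2 : i % 2 = 1 := Nat.odd_iff.mp hio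
        omega
    · -- r odd: show i - lbN i ≠ r
      have hlbr : lbN r = 1 := lbN_odd r (Nat.odd_iff.mp hro)
      rcases Nat.even_or_odd i with hie | hio
      · have hi2 : i % 2 = 0 := Nat.even_iff.mp hie
        have hlbi2 : lbN i % 2 = 0 := by rw [lbN_even i hi0 hi2]; omega
        have hlbile : lbN i ≤ i := (lbN_pos_le i hi0).2
        have hr2 : r % 2 = 1 := Nat.odd_iff.mp hro
        omega
      · have hlbi : lbN i = 1 := lbN_odd i (Nat.odd_iff.mp hio)
        have hi2 : i % 2 = 1 := Nat.odd_iff.mp hio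
        have hr2 : r % 2 = 1 := Nat.odd_iff.mp hro
        omega

theorem band_self_neg (n : ℕ) (h : 0 < n) :
    PySem.Int.band (n : Int) (-(n : Int)) = (lbN n : Int) := by
  have hneg : ¬ (0 ≤ -(n : Int)) := by omega
  rw [PySem.Int.band, if_pos (by positivity), if_neg hneg]
  have h1 : ((n : Int)).toNat = n := by omega
  have h2 : (-(-(n : Int)) - 1).toNat = n - 1 := by omega
  rw [h1, h2]
  exact_mod_cast land_pred n h

-- lowbit on the Int side, as the ports compute it
def lbI (i : Int) : Int := PySem.Int.band i (-i)

theorem lbI_eq (i : Int) (h : 0 < i) : lbI i = (lbN i.toNat : Int) := by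
  have h0 : ((i.toNat : Int)) = i := Int.toNat_of_nonneg h.le
  rw [lbI, ← h0]
  exact band_self_neg i.toNat (by omega)

theorem lbI_pos_le (i : Int) (h : 0 < i) : 0 < lbI i ∧ lbI i ≤ i := by
  rw [lbI_eq i h]
  have := lbN_pos_le i.toNat (by omega)
  omega

theorem covers_step (r i : Int) (hr : 1 ≤ r) (hi : 1 ≤ i) (hne : i ≠ r) :
    (r ≤ i ∧ i - lbI i < r) ↔ (r + lbI r ≤ i ∧ i - lbI i < r + lbI r) := by
  rw [lbI_eq r (by omega), lbI_eq i (by omega)]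
  have har : ((r.toNat : Int)) = r := by omega
  have hai : ((i.toNat : Int)) = i := by omega
  have hbr := lbN_pos_le r.toNat (by omega)
  have hbi := lbN_pos_le i.toNat (by omega)
  constructor
  · rintro ⟨h1, h2⟩
    have hk := lbK1 i.toNat r.toNat (by omega) (by omega) (by omega)
    omega
  · rintro ⟨h1, h2⟩
    have hk := lbK2 i.toNat r.toNat (by omega) (by omega) (by omega)
    omega

theorem sum_Ioc_glue (f : Int → Int) (a b c : Int) (h1 : a ≤ b) (h2 : b ≤ c) :
    ((∑ j ∈ Finset.Ioc a b, f j) + ∑ j ∈ Finset.Ioc b c, f j) = ∑ j ∈ Finset.Ioc a c, f j := by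
  rw [← Finset.sum_union (by
      simp [Finset.disjoint_left, Finset.mem_Ioc]
      intro x h1 h2 h3; omega)]
  congr 1
  ext x
  simp [Finset.mem_Ioc, Finset.mem_union]
  omega

-- ---- BIT representation ----
def BitRep (m : Int) (bit : List Int) (cnt : Int → Int) : Prop :=
  bit.length = (m + 1).toNat ∧
  ∀ i : Int, 1 ≤ i → i ≤ m →
    PySem.List.pyGetD bit i 0 = ∑ j ∈ Finset.Ioc (i - lbI i) i, cnt j

theorem BitRep_congr {m : Int} {bit : List Int} {cnt cnt' : Int → Int}
    (h : ∀ j, cnt j = cnt' j) (hb : BitRep m bit cnt) : BitRep m bit cnt' :=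
  ⟨hb.1, fun i h1 h2 => (hb.2 i h1 h2).trans (Finset.sum_congr rfl fun j _ => h j)⟩

theorem query_eq {m : Int} {bit : List Int} {cnt : Int → Int} (hb : BitRep m bit cnt) :
    ∀ (fuel : ℕ) (r t : Int), 0 ≤ r → r ≤ m → r.toNat ≤ fuel →
    bitQueryGo bit fuel r t = t + ∑ j ∈ Finset.Ioc 0 r, cnt j := by
  intro fuel
  induction fuel with
  | zero =>
    intro r t h0 hm hf
    have : r = 0 := by omega
    subst this
    simp [bitQueryGo]
  | succ fuel ih =>
    intro r t h0 hm hf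
    by_cases hp : 0 < r
    · rw [bitQueryGo, if_pos hp]
      have hlb := lbI_pos_le r hp
      rw [show PySem.Int.band r (-r) = lbI r from rfl]
      rw [ih (r - lbI r) _ (by omega) (by omega) (by omega)]
      rw [hb.2 r (by omega) hm]
      have hsum := sum_Ioc_glue (fun j => cnt j) 0 (r - lbI r) r (by omega) (by omega)
      linarith [hsum]
    · have : r = 0 := by omega
      subst this
      rw [bitQueryGo, if_neg hp]
      simp

theorem update_length (m delta : Int) :
    ∀ (fuel : ℕ) (r : Int) (bit : List Int), (bitUpdateGo m delta fuel r bit).length = bit.length := by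
  intro fuel
  induction fuel with
  | zero => intro r bit; rfl
  | succ fuel ih =>
    intro r bit
    rw [bitUpdateGo]
    split
    · rw [ih, PySem.List.length_pySetD]
    · rfl

theorem update_getD (m delta : Int) :
    ∀ (fuel : ℕ) (r : Int) (bit : List Int), bit.length = (m + 1).toNat → 1 ≤ r →
      (m + 1 - r).toNat ≤ fuel →
      ∀ i : Int, 1 ≤ i → i ≤ m →
        PySem.List.pyGetD (bitUpdateGo m delta fuel r bit) i 0 =
          PySem.List.pyGetD bit i 0 + (if r ≤ i ∧ i - lbI i < r then delta else 0) := by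
  intro fuel
  induction fuel with
  | zero =>
    intro r bit hlen hr hf i hi1 him
    rw [if_neg (by omega)]
    simp [bitUpdateGo]
  | succ fuel ih =>
    intro r bit hlen hr hf i hi1 him
    by_cases hrm : r ≤ m
    · rw [bitUpdateGo, if_pos hrm]
      have hlb := lbI_pos_le r (by omega)
      rw [show PySem.Int.band r (-r) = lbI r from rfl]
      have hlen1 : (PySem.List.pySetD bit r (PySem.List.pyGetD bit r 0 + delta)).length = (m + 1).toNat := by
        rw [PySem.List.length_pySetD]; exact hlen
      rw [ih (r + lbI r) _ hlen1 (by omega) (by omega) i hi1 him]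
      have hcast_r : ((r.toNat : Int)) = r := by omega
      have hcast_i : ((i.toNat : Int)) = i := by omega
      have hget : PySem.List.pyGetD (PySem.List.pySetD bit r (PySem.List.pyGetD bit r 0 + delta)) i 0
          = if i.toNat = r.toNat then PySem.List.pyGetD bit r 0 + delta else PySem.List.pyGetD bit i 0 := by
        rw [← hcast_r, ← hcast_i]
        rw [PySem.List.pyGetD_pySetD_natCast bit r.toNat i.toNat _ 0 (by omega)]
        rw [hcast_r, hcast_i]
      rw [hget]
      by_cases hir : i = r
      · subst hir
        rw [if_pos (by omega), if_neg (by omega), if_pos ⟨le_refl i, by omega⟩]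
        ring
      · rw [if_neg (by omega)]
        have hiff := covers_step r i hr hi1 hir
        by_cases hcov : r ≤ i ∧ i - lbI i < r
        · rw [if_pos (hiff.mp hcov), if_pos hcov]
        · rw [if_neg (fun hc => hcov (hiff.mpr hc)), if_neg hcov]
    · rw [bitUpdateGo, if_neg hrm, if_neg (by omega)]
      ring

theorem bitrep_update {m : Int} {bit : List Int} {cnt : Int → Int} (hb : BitRep m bit cnt)
    (delta : Int) (r : Int) (hr1 : 1 ≤ r) (hrm : r ≤ m) :
    BitRep m (bitUpdateGo m delta (m.toNat + 1) r bit)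
      (fun j => if j = r then cnt j + delta else cnt j) := by
  constructor
  · rw [update_length, hb.1]
  · intro i hi1 him
    rw [update_getD m delta (m.toNat + 1) r bit hb.1 hr1 (by omega) i hi1 him, hb.2 i hi1 him]
    have hsplit : ∀ j : Int, (if j = r then cnt j + delta else cnt j) = cnt j + (if j = r then delta else 0) := by
      intro j; split_ifs <;> ring
    rw [Finset.sum_congr rfl (fun j _ => hsplit j), Finset.sum_add_distrib]
    rw [Finset.sum_ite_eq' (Finset.Ioc (i - lbI i) i) r (fun _ => delta)]
    congr 1
    by_cases hc : r ≤ i ∧ i - lbI i < r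
    · rw [if_pos hc, if_pos (Finset.mem_Ioc.mpr ⟨hc.2, hc.1⟩)]
    · rw [if_neg hc, if_neg (fun h => hc ⟨(Finset.mem_Ioc.mp h).2, (Finset.mem_Ioc.mp h).1⟩)]

-- ---- counting ----
def cntOf (W : List Int) : Int → Int := fun j => (W.count j : Int)

theorem sum_Ioc_cntOf (W : List Int) (a b : Int) :
    ∑ j ∈ Finset.Ioc a b, cntOf W j = (W.countP (fun x => decide (a < x ∧ x ≤ b)) : Int) := by
  induction W with
  | nil => simp [cntOf]
  | cons w W ih =>
    have hcnt : ∀ j : Int, cntOf (w :: W) j = cntOf W j + (if j = w then 1 else 0) := by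
      intro j
      simp [cntOf, List.count_cons]
      split_ifs with h1 h2 h2 <;> simp_all <;> omega
    rw [Finset.sum_congr rfl (fun j _ => hcnt j), Finset.sum_add_distrib, ih]
    rw [Finset.sum_ite_eq' (Finset.Ioc a b) w (fun _ => (1:Int))]
    rw [List.countP_cons]
    by_cases hw : a < w ∧ w ≤ b
    · rw [if_pos (Finset.mem_Ioc.mpr ⟨hw.1, hw.2⟩), if_pos (by simpa using hw)]
      push_cast; ring
    · rw [if_neg (fun h => hw ⟨(Finset.mem_Ioc.mp h).1, (Finset.mem_Ioc.mp h).2⟩),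
          if_neg (by simpa using hw)]
      push_cast; ring

theorem bitrep_append {m : Int} {bit : List Int} {W : List Int} (hb : BitRep m bit (cntOf W))
    (r : Int) (hr1 : 1 ≤ r) (hrm : r ≤ m) :
    BitRep m (bitUpdateGo m 1 (m.toNat + 1) r bit) (cntOf (W ++ [r])) := by
  refine BitRep_congr ?_ (bitrep_update hb 1 r hr1 hrm)
  intro j
  simp only [cntOf, List.count_append, List.count_cons, List.count_nil, beq_iff_eq]
  split_ifs <;> push_cast <;> omega

theorem bitrep_detach {m : Int} {bit : List Int} {W : List Int} {r : Int}
    (hb : BitRep m bit (cntOf (r :: W))) (hr1 : 1 ≤ r) (hrm : r ≤ m) :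
    BitRep m (bitUpdateGo m (-1) (m.toNat + 1) r bit) (cntOf W) := by
  refine BitRep_congr ?_ (bitrep_update hb (-1) r hr1 hrm)
  intro j
  simp only [cntOf, List.count_cons, beq_iff_eq]
  split_ifs <;> push_cast <;> omega

theorem query_cntOf {m : Int} {bit : List Int} {W : List Int} (hb : BitRep m bit (cntOf W))
    (hW : ∀ x ∈ W, 1 ≤ x ∧ x ≤ m) (r t : Int) (h0 : 0 ≤ r) (hm : r ≤ m) :
    bitQueryGo bit r.toNat r t = t + (W.countP (fun x => decide (x ≤ r)) : Int) := by
  rw [query_eq hb r.toNat r t h0 hm (le_refl _), sum_Ioc_cntOf W 0 r]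
  congr 2
  apply List.countP_congr
  intro x hx
  have hx1 := hW x hx
  simp only [decide_eq_true_eq]
  omega

-- ---- inversion counting ----
def invCnt : List Int → Int
  | [] => 0
  | x :: t => (t.countP (fun y => decide (y < x)) : Int) + invCnt t

theorem invCnt_append (l : List Int) (x : Int) :
    invCnt (l ++ [x]) = invCnt l + (l.countP (fun y => decide (x < y)) : Int) := by
  induction l with
  | nil => simp [invCnt]
  | cons a t ih =>
    rw [List.cons_append]
    simp only [invCnt]
    rw [List.countP_append, ih]
    simp only [List.countP_cons, List.countP_nil]
    push_cast
    split_ifs <;> ring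

theorem invCnt_map_mono (f : Int → Int) (l : List Int)
    (h : ∀ x ∈ l, ∀ y ∈ l, (f y < f x ↔ y < x)) : invCnt (l.map f) = invCnt l := by
  induction l with
  | nil => rfl
  | cons a t ih =>
    simp only [List.map_cons, invCnt]
    rw [List.countP_map, ih (fun x hx y hy => h x (List.mem_cons_of_mem a hx) y (List.mem_cons_of_mem a hy))]
    congr 2
    apply List.countP_congr
    intro y hy
    simp only [Function.comp_apply, decide_eq_true_eq]
    exact h a (by simp) y (List.mem_cons_of_mem a hy)


-- ---- ranks of a concrete nums ----
def suOf (nums : List Int) : List Int := PySem.List.sorted (PySem.Set.ofList nums) (fun x => x) false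
def rmOf (nums : List Int) : PySem.Dict Int Int :=
  (PySem.List.enumerate (suOf nums) 0).foldl (fun d p => d.insert p.2 (p.1 + 1)) PySem.Dict.empty
def rkOf (nums : List Int) (x : Int) : Int := (rmOf nums).getD x 0
def ranksOf (nums : List Int) : List Int := nums.map (fun x => rkOf nums x)

theorem su_pairwise (nums : List Int) : (suOf nums).Pairwise (· < ·) :=
  PySem.List.sorted_ofList_pairwise_lt nums

theorem su_nodup (nums : List Int) : (suOf nums).Nodup :=
  (su_pairwise nums).imp ne_of_lt

theorem mem_su (nums : List Int) (x : Int) : x ∈ suOf nums ↔ x ∈ nums := by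
  rw [suOf, PySem.List.mem_sorted]
  exact PySem.Set.mem_ofList nums x

theorem rk_getElem (nums : List Int) (idx : ℕ) (h : idx < (suOf nums).length) :
    rkOf nums ((suOf nums)[idx]) = (idx : Int) + 1 := by
  have hfresh : ∀ a ∈ PySem.List.enumerate (suOf nums) 0,
      (PySem.Dict.empty (κ := Int) (ν := Int)).contains a.2 = false :=
    fun a _ => PySem.Dict.contains_empty a.2
  have hnd : ((PySem.List.enumerate (suOf nums) 0).map (·.2)).Nodup := by
    rw [PySem.List.map_snd_enumerate]; exact su_nodup nums
  have hitems := PySem.Dict.items_foldl_insert_fresh (PySem.List.enumerate (suOf nums) 0)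
    (·.2) (fun p => p.1 + 1) PySem.Dict.empty hfresh hnd
  have hknd : (rmOf nums).keys.Nodup := by
    rw [rmOf]
    exact PySem.Dict.nodup_keys_foldl_insert_key _ _ _ _ PySem.Dict.nodup_keys_empty
  have hmem : ((suOf nums)[idx], (idx : Int) + 1) ∈ (rmOf nums).items := by
    rw [rmOf, hitems]
    refine List.mem_append_right _ (List.mem_map.mpr ?_)
    refine ⟨((idx : Int), (suOf nums)[idx]), ?_, by simp⟩
    rw [PySem.List.mem_enumerate_iff]
    exact ⟨idx, h, by simp⟩
  exact PySem.Dict.getD_of_mem_items (rmOf nums) hmem hknd 0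

theorem su_strict (nums : List Int) {p q : ℕ} (hp : p < q) (hq : q < (suOf nums).length) :
    (suOf nums)[p]'(by omega) < (suOf nums)[q] :=
  (List.pairwise_iff_getElem.mp (su_pairwise nums)) p q (by omega) hq hp

theorem rk_bounds (nums : List Int) (x : Int) (hx : x ∈ nums) :
    1 ≤ rkOf nums x ∧ rkOf nums x ≤ ((suOf nums).length : Int) := by
  obtain ⟨idx, h, heq⟩ := List.getElem_of_mem ((mem_su nums x).mpr hx)
  rw [← heq, rk_getElem nums idx h]
  omega

theorem rk_lt_iff (nums : List Int) (x y : Int) (hx : x ∈ nums) (hy : y ∈ nums) :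
    rkOf nums y < rkOf nums x ↔ y < x := by
  obtain ⟨ix, hix, hxe⟩ := List.getElem_of_mem ((mem_su nums x).mpr hx)
  obtain ⟨iy, hiy, hye⟩ := List.getElem_of_mem ((mem_su nums y).mpr hy)
  rw [← hxe, ← hye, rk_getElem nums ix hix, rk_getElem nums iy hiy]
  constructor
  · intro hlt
    exact su_strict nums (by omega) hix
  · intro hlt
    by_contra hge
    rcases Nat.lt_or_ge ix iy with hcase | hcase
    · exact absurd (su_strict nums hcase hiy) (not_lt_of_gt hlt)
    · have : ix = iy := by omega
      subst this
      exact absurd hlt (lt_irrefl _)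

theorem ranks_length (nums : List Int) : (ranksOf nums).length = nums.length := by
  rw [ranksOf, List.length_map]

theorem ranks_bounds (nums : List Int) (r : Int) (hr : r ∈ ranksOf nums) :
    1 ≤ r ∧ r ≤ ((suOf nums).length : Int) := by
  obtain ⟨x, hx, heq⟩ := List.mem_map.mp hr
  rw [← heq]
  exact rk_bounds nums x hx


-- ---- loop characterizations ----
def loop1A (R : List Int) (m k : Int) : Int × List Int :=
  (PySem.List.pyRange 0 k 1).foldl
    (fun (st : Int × List Int) i =>
      let rank := PySem.List.pyGetD R i 0
      (st.1 + (i - bitQueryGo st.2 rank.toNat rank 0),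
       bitUpdateGo m 1 (m.toNat + 1) rank st.2))
    (0, PySem.List.pyRepeat [0] (m + 1))

def loop2A (R : List Int) (m k n : Int) (st0 : Int × Int × List Int) : Int × Int × List Int :=
  (PySem.List.pyRange k n 1).foldl
    (fun (st : Int × Int × List Int) i =>
      let outRank := PySem.List.pyGetD R (i - k) 0
      let inRank := PySem.List.pyGetD R i 0
      let cur1 := st.1 - bitQueryGo st.2.2 (outRank - 1).toNat (outRank - 1) 0
      let bit1 := bitUpdateGo m (-1) (m.toNat + 1) outRank st.2.2
      let cur2 := cur1 + (k - 1 - bitQueryGo bit1 inRank.toNat inRank 0)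
      let bit2 := bitUpdateGo m 1 (m.toNat + 1) inRank bit1
      (cur2, (if cur2 < st.2.1 then cur2 else st.2.1), bit2))
    st0

theorem portA_char (nums : List Int) (k : Int) :
    minInversionCount nums k =
      (loop2A (ranksOf nums) ((suOf nums).length : Int) k (nums.length : Int)
        ((loop1A (ranksOf nums) ((suOf nums).length : Int) k).1,
         (loop1A (ranksOf nums) ((suOf nums).length : Int) k).1,
         (loop1A (ranksOf nums) ((suOf nums).length : Int) k).2)).2.1 := rfl

def winOf (R : List Int) (kN s : ℕ) : List Int := (R.drop s).take kN

def minsOf (R : List Int) (kN : ℕ) : ℕ → Int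
  | 0 => invCnt (winOf R kN 0)
  | t + 1 => min (minsOf R kN t) (invCnt (winOf R kN (t + 1)))

theorem win_zero (R : List Int) (kN : ℕ) : winOf R kN 0 = R.take kN := by
  simp [winOf]

theorem mem_win (R : List Int) (kN s : ℕ) (x : Int) (h : x ∈ winOf R kN s) : x ∈ R :=
  List.mem_of_mem_drop (List.mem_of_mem_take h)

theorem win_cons (R : List Int) (kN t : ℕ) (hk : 1 ≤ kN) (hlen : t + kN ≤ R.length) :
    winOf R kN t = (R[t]'(by omega)) :: (R.drop (t + 1)).take (kN - 1) := by
  rw [winOf, List.drop_eq_getElem_cons (by omega)]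
  cases kN with
  | zero => omega
  | succ k' => rw [List.take_succ_cons]; rfl

theorem win_snoc (R : List Int) (kN t : ℕ) (hk : 1 ≤ kN) (hlen : t + 1 + kN ≤ R.length) :
    winOf R kN (t + 1) = (R.drop (t + 1)).take (kN - 1) ++ [R[kN + t]'(by omega)] := by
  cases kN with
  | zero => omega
  | succ k' =>
    have h2 : k' < (R.drop (t + 1)).length := by rw [List.length_drop]; omega
    rw [winOf, List.take_succ, List.getElem?_eq_getElem h2, List.getElem_drop]
    simp only [Nat.add_sub_cancel, Option.toList_some]
    simp only [show t + 1 + k' = k' + 1 + t from by omega]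

theorem countP_split (l : List Int) (p : Int → Bool) :
    l.countP p + l.countP (fun x => !p x) = l.length := by
  induction l with
  | nil => simp
  | cons a t ih =>
    rw [List.countP_cons, List.countP_cons]
    cases h : p a <;> simp [h] <;> omega

theorem pymin (a b : Int) : (if b < a then b else a) = min a b := by
  split_ifs <;> omega

theorem bitrep_init (m : Int) (hm : 0 ≤ m) :
    BitRep m (PySem.List.pyRepeat [0] (m + 1)) (fun _ => 0) := by
  constructor
  · rw [PySem.List.pyRepeat_singleton, List.length_replicate]
  · intro i h1 h2
    rw [PySem.List.pyRepeat_singleton,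
        PySem.List.pyGetD_eq_getElem _ 0 (by omega) (by rw [List.length_replicate]; omega)]
    simp

theorem fold_min_self (l : List Int) (a : Int) (h : ∀ x ∈ l, x = a) :
    List.foldl min a l = a := by
  induction l with
  | nil => rfl
  | cons x t ih =>
    rw [List.foldl_cons, h x (by simp), min_self]
    exact ih (fun y hy => h y (by simp [hy]))


theorem countP_le_lt (l : List Int) (r : Int) :
    l.countP (fun y => decide (y ≤ r)) + l.countP (fun y => decide (r < y)) = l.length := by
  rw [← countP_split l (fun y => decide (y ≤ r))]
  congr 1
  apply List.countP_congr
  intro y _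
  rw [← decide_not]
  simp only [decide_eq_true_eq]
  omega

theorem loop1_inv (R : List Int) (m : Int) (hm : 0 ≤ m)
    (hR : ∀ r ∈ R, 1 ≤ r ∧ r ≤ m) :
    ∀ j : ℕ, j ≤ R.length →
      (loop1A R m (j : Int)).1 = invCnt (R.take j) ∧
      BitRep m (loop1A R m (j : Int)).2 (cntOf (R.take j)) := by
  intro j
  induction j with
  | zero =>
    intro _
    have h0 : loop1A R m ((0 : ℕ) : Int) = (0, PySem.List.pyRepeat [0] (m + 1)) := by
      unfold loop1A
      rw [show (((0:ℕ):Int)) = (0:Int) from rfl, PySem.List.pyRange_one_eq_nil (le_refl 0), List.foldl_nil]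
    rw [h0]
    refine ⟨rfl, BitRep_congr (fun j => by simp [cntOf]) (bitrep_init m hm)⟩
  | succ j ih =>
    intro hj
    obtain ⟨ih1, ih2⟩ := ih (by omega)
    have hstep : loop1A R m ((j:Int) + 1) =
        (let rank := PySem.List.pyGetD R (j:Int) 0
         ((loop1A R m (j:Int)).1 + ((j:Int) - bitQueryGo (loop1A R m (j:Int)).2 rank.toNat rank 0),
          bitUpdateGo m 1 (m.toNat + 1) rank (loop1A R m (j:Int)).2)) := by
      unfold loop1A
      rw [PySem.List.pyRange_one_succ_right (by positivity), List.foldl_append, List.foldl_cons, List.foldl_nil]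
    have hcast : (((j + 1 : ℕ)) : Int) = (j : Int) + 1 := by push_cast; ring
    rw [hcast, hstep]
    have hjlen : j < R.length := by omega
    have hrank : PySem.List.pyGetD R (j:Int) 0 = R[j] := by
      rw [PySem.List.pyGetD_eq_getElem R 0 (by positivity) (by exact_mod_cast hjlen)]
      simp
    have hmemR : R[j] ∈ R := List.getElem_mem hjlen
    have hbnd := hR R[j] hmemR
    have htake : R.take (j + 1) = R.take j ++ [R[j]] := by
      rw [List.take_succ, List.getElem?_eq_getElem hjlen, Option.toList_some]
    have hWmem : ∀ x ∈ R.take j, 1 ≤ x ∧ x ≤ m := fun x hx => hR x (List.mem_of_mem_take hx)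
    have hq := query_cntOf ih2 hWmem R[j] 0 (by omega) (by omega)
    have hlen_take : (R.take j).length = j := by rw [List.length_take]; omega
    have hcp := countP_le_lt (R.take j) R[j]
    constructor
    · simp only [hrank]
      rw [hq, htake, invCnt_append]
      rw [ih1]
      push_cast
      omega
    · simp only [hrank]
      rw [htake]
      exact bitrep_append ih2 R[j] (by omega) (by omega)


theorem invCnt_cons (a : Int) (l : List Int) :
    invCnt (a :: l) = (l.countP (fun y => decide (y < a)) : Int) + invCnt l := rfl

theorem loop2_inv (R : List Int) (m : Int) (kN : ℕ) (hk1 : 1 ≤ kN)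
    (hR : ∀ r ∈ R, 1 ≤ r ∧ r ≤ m)
    (st0 : Int × Int × List Int)
    (h01 : st0.1 = invCnt (winOf R kN 0))
    (h02 : st0.2.1 = minsOf R kN 0)
    (h0b : BitRep m st0.2.2 (cntOf (winOf R kN 0))) :
    ∀ t : ℕ, kN + t ≤ R.length →
      (loop2A R m (kN:Int) ((kN:Int) + (t:Int)) st0).1 = invCnt (winOf R kN t) ∧
      (loop2A R m (kN:Int) ((kN:Int) + (t:Int)) st0).2.1 = minsOf R kN t ∧
      BitRep m (loop2A R m (kN:Int) ((kN:Int) + (t:Int)) st0).2.2 (cntOf (winOf R kN t)) := by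
  intro t
  induction t with
  | zero =>
    intro _
    have h0 : loop2A R m (kN:Int) ((kN:Int) + ((0:ℕ):Int)) st0 = st0 := by
      unfold loop2A
      rw [show ((kN:Int) + ((0:ℕ):Int)) = (kN:Int) from by push_cast; ring]
      rw [PySem.List.pyRange_one_eq_nil (le_refl _), List.foldl_nil]
    rw [h0]
    exact ⟨h01, h02, h0b⟩
  | succ t ih =>
    intro hlen
    obtain ⟨ih1, ih2, ih3⟩ := ih (by omega)
    have hstep : loop2A R m (kN:Int) ((kN:Int) + ((t+1:ℕ):Int)) st0 =
        (let st := loop2A R m (kN:Int) ((kN:Int) + (t:Int)) st0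
         let outRank := PySem.List.pyGetD R (((kN:Int) + (t:Int)) - (kN:Int)) 0
         let inRank := PySem.List.pyGetD R ((kN:Int) + (t:Int)) 0
         let cur1 := st.1 - bitQueryGo st.2.2 (outRank - 1).toNat (outRank - 1) 0
         let bit1 := bitUpdateGo m (-1) (m.toNat + 1) outRank st.2.2
         let cur2 := cur1 + ((kN:Int) - 1 - bitQueryGo bit1 inRank.toNat inRank 0)
         let bit2 := bitUpdateGo m 1 (m.toNat + 1) inRank bit1
         (cur2, (if cur2 < st.2.1 then cur2 else st.2.1), bit2)) := by
      unfold loop2A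
      rw [show ((kN:Int) + ((t+1:ℕ):Int)) = ((kN:Int) + (t:Int)) + 1 from by push_cast; ring]
      rw [PySem.List.pyRange_one_succ_right (by omega), List.foldl_append, List.foldl_cons, List.foldl_nil]
    rw [hstep]
    have htR : t < R.length := by omega
    have hktR : kN + t < R.length := by omega
    have hout : PySem.List.pyGetD R (((kN:Int) + (t:Int)) - (kN:Int)) 0 = R[t] := by
      rw [show ((kN:Int) + (t:Int)) - (kN:Int) = (t:Int) from by ring]
      rw [PySem.List.pyGetD_eq_getElem R 0 (by positivity) (by exact_mod_cast htR)]
      simp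
    have hin : PySem.List.pyGetD R ((kN:Int) + (t:Int)) 0 = R[kN + t] := by
      rw [show ((kN:Int) + (t:Int)) = (((kN + t : ℕ)):Int) from by push_cast; ring]
      rw [PySem.List.pyGetD_eq_getElem R 0 (by positivity) (by exact_mod_cast hktR)]
      simp only [Int.toNat_natCast]
    have ha := hR R[t] (List.getElem_mem htR)
    have hb := hR R[kN + t] (List.getElem_mem hktR)
    have hwcons : winOf R kN t = R[t] :: (R.drop (t + 1)).take (kN - 1) :=
      win_cons R kN t hk1 (by omega)
    have hwsnoc : winOf R kN (t + 1) = (R.drop (t + 1)).take (kN - 1) ++ [R[kN + t]] :=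
      win_snoc R kN t hk1 (by omega)
    have hmidmem : ∀ x ∈ (R.drop (t + 1)).take (kN - 1), 1 ≤ x ∧ x ≤ m :=
      fun x hx => hR x (List.mem_of_mem_drop (List.mem_of_mem_take hx))
    have hmidlen : ((R.drop (t + 1)).take (kN - 1)).length = kN - 1 := by
      rw [List.length_take, List.length_drop]
      omega
    have hwmem : ∀ x ∈ winOf R kN t, 1 ≤ x ∧ x ≤ m :=
      fun x hx => hR x (mem_win R kN t x hx)
    -- first query: count of elements < outRank in the window
    have hq1 := query_cntOf ih3 hwmem (R[t] - 1) 0 (by omega) (by omega)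
    have hq1' : ((winOf R kN t).countP (fun y => decide (y ≤ R[t] - 1)) : Int)
        = ((R.drop (t + 1)).take (kN - 1)).countP (fun y => decide (y < R[t])) := by
      rw [hwcons, List.countP_cons]
      have : (List.countP (fun y => decide (y ≤ R[t] - 1)) ((R.drop (t + 1)).take (kN - 1)))
          = List.countP (fun y => decide (y < R[t])) ((R.drop (t + 1)).take (kN - 1)) := by
        apply List.countP_congr
        intro y _
        simp only [decide_eq_true_eq]
        omega
      rw [this]
      simp
    have hcur1 : (loop2A R m (kN:Int) ((kN:Int) + (t:Int)) st0).1 -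
        bitQueryGo (loop2A R m (kN:Int) ((kN:Int) + (t:Int)) st0).2.2
          (R[t] - 1).toNat (R[t] - 1) 0
        = invCnt ((R.drop (t + 1)).take (kN - 1)) := by
      rw [hq1, hq1', ih1, hwcons, invCnt_cons]
      ring
    have hdet : BitRep m (bitUpdateGo m (-1) (m.toNat + 1) R[t]
        (loop2A R m (kN:Int) ((kN:Int) + (t:Int)) st0).2.2)
        (cntOf ((R.drop (t + 1)).take (kN - 1))) := by
      refine bitrep_detach ?_ (by omega) (by omega)
      rw [← hwcons]
      exact ih3
    have hq2 := query_cntOf hdet hmidmem R[kN + t] 0 (by omega) (by omega)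
    have hcp := countP_le_lt ((R.drop (t + 1)).take (kN - 1)) R[kN + t]
    have hcur2 : invCnt ((R.drop (t + 1)).take (kN - 1)) +
        ((kN:Int) - 1 - (0 + (((R.drop (t + 1)).take (kN - 1)).countP (fun y => decide (y ≤ R[kN + t])) : Int)))
        = invCnt (winOf R kN (t + 1)) := by
      rw [hwsnoc, invCnt_append]
      rw [hmidlen] at hcp
      push_cast
      omega
    refine ⟨?_, ?_, ?_⟩
    · show (let st := loop2A R m (kN:Int) ((kN:Int) + (t:Int)) st0
            let outRank := PySem.List.pyGetD R (((kN:Int) + (t:Int)) - (kN:Int)) 0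
            let inRank := PySem.List.pyGetD R ((kN:Int) + (t:Int)) 0
            let cur1 := st.1 - bitQueryGo st.2.2 (outRank - 1).toNat (outRank - 1) 0
            let bit1 := bitUpdateGo m (-1) (m.toNat + 1) outRank st.2.2
            let cur2 := cur1 + ((kN:Int) - 1 - bitQueryGo bit1 inRank.toNat inRank 0)
            let bit2 := bitUpdateGo m 1 (m.toNat + 1) inRank bit1
            (cur2, (if cur2 < st.2.1 then cur2 else st.2.1), bit2)).1 = invCnt (winOf R kN (t+1))
      simp only [hout, hin]
      rw [hcur1, hq2, hcur2]
    · show (let st := loop2A R m (kN:Int) ((kN:Int) + (t:Int)) st0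
            let outRank := PySem.List.pyGetD R (((kN:Int) + (t:Int)) - (kN:Int)) 0
            let inRank := PySem.List.pyGetD R ((kN:Int) + (t:Int)) 0
            let cur1 := st.1 - bitQueryGo st.2.2 (outRank - 1).toNat (outRank - 1) 0
            let bit1 := bitUpdateGo m (-1) (m.toNat + 1) outRank st.2.2
            let cur2 := cur1 + ((kN:Int) - 1 - bitQueryGo bit1 inRank.toNat inRank 0)
            let bit2 := bitUpdateGo m 1 (m.toNat + 1) inRank bit1
            (cur2, (if cur2 < st.2.1 then cur2 else st.2.1), bit2)).2.1 = minsOf R kN (t+1)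
      simp only [hout, hin]
      rw [hcur1, hq2, hcur2, ih2, pymin]
      rfl
    · show BitRep m (let st := loop2A R m (kN:Int) ((kN:Int) + (t:Int)) st0
            let outRank := PySem.List.pyGetD R (((kN:Int) + (t:Int)) - (kN:Int)) 0
            let inRank := PySem.List.pyGetD R ((kN:Int) + (t:Int)) 0
            let cur1 := st.1 - bitQueryGo st.2.2 (outRank - 1).toNat (outRank - 1) 0
            let bit1 := bitUpdateGo m (-1) (m.toNat + 1) outRank st.2.2
            let cur2 := cur1 + ((kN:Int) - 1 - bitQueryGo bit1 inRank.toNat inRank 0)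
            let bit2 := bitUpdateGo m 1 (m.toNat + 1) inRank bit1
            (cur2, (if cur2 < st.2.1 then cur2 else st.2.1), bit2)).2.2 (cntOf (winOf R kN (t+1)))
      simp only [hout, hin]
      rw [hwsnoc]
      exact bitrep_append hdet R[kN + t] (by omega) (by omega)


theorem loop2_zero (R : List Int) (m : Int) (hm : 0 ≤ m)
    (hR : ∀ r ∈ R, 1 ≤ r ∧ r ≤ m)
    (st0 : Int × Int × List Int)
    (h01 : st0.1 = 0) (h02 : st0.2.1 = 0) (h0b : BitRep m st0.2.2 (fun _ => 0)) :
    ∀ t : ℕ, t ≤ R.length →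
      (loop2A R m 0 (t:Int) st0).1 = 0 ∧
      (loop2A R m 0 (t:Int) st0).2.1 = 0 ∧
      BitRep m (loop2A R m 0 (t:Int) st0).2.2 (fun _ => 0) := by
  intro t
  induction t with
  | zero =>
    intro _
    have h0 : loop2A R m 0 ((0:ℕ):Int) st0 = st0 := by
      unfold loop2A
      rw [show (((0:ℕ)):Int) = (0:Int) from rfl, PySem.List.pyRange_one_eq_nil (le_refl _), List.foldl_nil]
    rw [h0]
    exact ⟨h01, h02, h0b⟩
  | succ t ih =>
    intro hlen
    obtain ⟨ih1, ih2, ih3⟩ := ih (by omega)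
    have hstep : loop2A R m 0 ((t+1:ℕ):Int) st0 =
        (let st := loop2A R m 0 (t:Int) st0
         let outRank := PySem.List.pyGetD R ((t:Int) - 0) 0
         let inRank := PySem.List.pyGetD R (t:Int) 0
         let cur1 := st.1 - bitQueryGo st.2.2 (outRank - 1).toNat (outRank - 1) 0
         let bit1 := bitUpdateGo m (-1) (m.toNat + 1) outRank st.2.2
         let cur2 := cur1 + ((0:Int) - 1 - bitQueryGo bit1 inRank.toNat inRank 0)
         let bit2 := bitUpdateGo m 1 (m.toNat + 1) inRank bit1
         (cur2, (if cur2 < st.2.1 then cur2 else st.2.1), bit2)) := by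
      unfold loop2A
      rw [show (((t+1:ℕ)):Int) = ((t:Int)) + 1 from by push_cast; ring]
      rw [PySem.List.pyRange_one_succ_right (by positivity), List.foldl_append, List.foldl_cons, List.foldl_nil]
    rw [hstep]
    have htR : t < R.length := by omega
    have hout : PySem.List.pyGetD R ((t:Int) - 0) 0 = R[t] := by
      rw [show ((t:Int)) - 0 = ((t:Int)) from by ring]
      rw [PySem.List.pyGetD_eq_getElem R 0 (by positivity) (by exact_mod_cast htR)]
      simp
    have hout' : PySem.List.pyGetD R (t:Int) 0 = R[t] := by
      rw [PySem.List.pyGetD_eq_getElem R 0 (by positivity) (by exact_mod_cast htR)]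
      simp
    have ha := hR R[t] (List.getElem_mem htR)
    have hq1 : bitQueryGo (loop2A R m 0 (t:Int) st0).2.2 (R[t] - 1).toNat (R[t] - 1) 0 = 0 := by
      rw [query_eq ih3 (R[t] - 1).toNat (R[t] - 1) 0 (by omega) (by omega) (le_refl _)]
      simp
    have hdet := bitrep_update ih3 (-1) R[t] (by omega) (by omega)
    have hq2 : bitQueryGo (bitUpdateGo m (-1) (m.toNat + 1) R[t] (loop2A R m 0 (t:Int) st0).2.2)
        R[t].toNat R[t] 0 = -1 := by
      rw [query_eq hdet R[t].toNat R[t] 0 (by omega) (by omega) (le_refl _)]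
      have : ∀ j ∈ Finset.Ioc (0:Int) R[t], (if j = R[t] then (0:Int) + (-1) else 0) = (if j = R[t] then (-1:Int) else 0) := by
        intro j _; split_ifs <;> ring
      rw [Finset.sum_congr rfl this, Finset.sum_ite_eq' (Finset.Ioc (0:Int) R[t]) R[t] (fun _ => (-1:Int))]
      rw [if_pos (Finset.mem_Ioc.mpr ⟨by omega, le_refl _⟩)]
      ring
    have hadd := bitrep_update hdet 1 R[t] (by omega) (by omega)
    refine ⟨?_, ?_, ?_⟩
    · show (let st := loop2A R m 0 (t:Int) st0
            let outRank := PySem.List.pyGetD R ((t:Int) - 0) 0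
            let inRank := PySem.List.pyGetD R (t:Int) 0
            let cur1 := st.1 - bitQueryGo st.2.2 (outRank - 1).toNat (outRank - 1) 0
            let bit1 := bitUpdateGo m (-1) (m.toNat + 1) outRank st.2.2
            let cur2 := cur1 + ((0:Int) - 1 - bitQueryGo bit1 inRank.toNat inRank 0)
            let bit2 := bitUpdateGo m 1 (m.toNat + 1) inRank bit1
            (cur2, (if cur2 < st.2.1 then cur2 else st.2.1), bit2)).1 = 0
      simp only [hout, hout']
      rw [hq1, hq2, ih1]
      ring
    · show (let st := loop2A R m 0 (t:Int) st0
            let outRank := PySem.List.pyGetD R ((t:Int) - 0) 0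
            let inRank := PySem.List.pyGetD R (t:Int) 0
            let cur1 := st.1 - bitQueryGo st.2.2 (outRank - 1).toNat (outRank - 1) 0
            let bit1 := bitUpdateGo m (-1) (m.toNat + 1) outRank st.2.2
            let cur2 := cur1 + ((0:Int) - 1 - bitQueryGo bit1 inRank.toNat inRank 0)
            let bit2 := bitUpdateGo m 1 (m.toNat + 1) inRank bit1
            (cur2, (if cur2 < st.2.1 then cur2 else st.2.1), bit2)).2.1 = 0
      simp only [hout, hout']
      rw [hq1, hq2, ih1, ih2]
      norm_num
    · show BitRep m (let st := loop2A R m 0 (t:Int) st0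
            let outRank := PySem.List.pyGetD R ((t:Int) - 0) 0
            let inRank := PySem.List.pyGetD R (t:Int) 0
            let cur1 := st.1 - bitQueryGo st.2.2 (outRank - 1).toNat (outRank - 1) 0
            let bit1 := bitUpdateGo m (-1) (m.toNat + 1) outRank st.2.2
            let cur2 := cur1 + ((0:Int) - 1 - bitQueryGo bit1 inRank.toNat inRank 0)
            let bit2 := bitUpdateGo m 1 (m.toNat + 1) inRank bit1
            (cur2, (if cur2 < st.2.1 then cur2 else st.2.1), bit2)).2.2 (fun _ => 0)
      simp only [hout, hout']
      refine BitRep_congr ?_ hadd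
      intro j
      by_cases h : j = R[t] <;> simp [h]

-- ---- B-side bridge ----
theorem invCnt_pyRange (g : Int → Int) :
    ∀ (len : ℕ) (a : Int),
      ((PySem.List.pyRange a (a + (len:Int)) 1).map (fun i =>
        ((PySem.List.pyRange (i + 1) (a + (len:Int)) 1).map (fun j =>
          if g i > g j then (1 : Int) else 0)).sum)).sum
      = invCnt ((PySem.List.pyRange a (a + (len:Int)) 1).map g) := by
  intro len
  induction len with
  | zero =>
    intro a
    rw [show a + (((0:ℕ)):Int) = a from by push_cast; ring]
    rw [PySem.List.pyRange_one_eq_nil (le_refl _)]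
    rfl
  | succ len ih =>
    intro a
    have hb : a + (((len+1:ℕ)):Int) = (a + 1) + ((len:ℕ):Int) := by push_cast; ring
    have hcons : PySem.List.pyRange a (a + (((len+1:ℕ)):Int)) 1
        = a :: PySem.List.pyRange (a + 1) (a + (((len+1:ℕ)):Int)) 1 :=
      PySem.List.pyRange_one_cons (by push_cast; omega)
    rw [hcons, List.map_cons, List.map_cons, List.sum_cons, invCnt_cons]
    rw [hb, ih (a + 1)]
    congr 1
    have hh : ∀ j ∈ PySem.List.pyRange (a+1) ((a+1) + ((len:ℕ):Int)) 1,
        (if g a > g j then (1:Int) else 0) = (if (fun j => decide (g j < g a)) j = true then (1:Int) else 0) := by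
      intro j _
      by_cases h : g j < g a <;> simp [h, gt_iff_lt]
    rw [List.map_congr_left hh, PySem.List.sum_map_ite_one_zero, List.countP_map]
    congr 1

theorem map_g_pyRange (nums : List Int) (s kN : ℕ) (hlen : s + kN ≤ nums.length) :
    (PySem.List.pyRange (s:Int) ((s:Int) + (kN:Int)) 1).map (fun i => PySem.List.pyGetD nums i 0)
      = (nums.drop s).take kN := by
  have hsplit := PySem.List.pyRange_one_append (s:Int) ((s:Int) + (kN:Int)) ((nums.length:ℕ):Int)
    (by omega) (by push_cast; omega)
  have hfull := PySem.List.map_pyGetD_pyRange nums 0 (a := (s:Int)) (by positivity)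
  rw [show PySem.List.len nums = ((nums.length:ℕ):Int) from by simp [PySem.List.len_eq]] at hfull
  rw [hsplit, List.map_append] at hfull
  have hlen1 : ((PySem.List.pyRange (s:Int) ((s:Int) + (kN:Int)) 1).map (fun i => PySem.List.pyGetD nums i 0)).length = kN := by
    rw [List.length_map, PySem.List.length_pyRange_one]
    omega
  have := congrArg (List.take kN) hfull
  rw [List.take_left' hlen1] at this
  rw [this]
  simp [Int.toNat_natCast]

theorem windowInv_eq (nums : List Int) (kN s : ℕ) (hlen : s + kN ≤ nums.length) :
    windowInv nums (kN:Int) (s:Int) = invCnt (winOf (ranksOf nums) kN s) := by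
  rw [windowInv, invCnt_pyRange (fun i => PySem.List.pyGetD nums i 0) kN (s:Int),
      map_g_pyRange nums s kN hlen]
  have hwin : winOf (ranksOf nums) kN s = ((nums.drop s).take kN).map (fun x => rkOf nums x) := by
    rw [winOf, ranksOf, ← List.map_drop, ← List.map_take]
  rw [hwin]
  refine (invCnt_map_mono _ _ ?_).symm
  intro x hx y hy
  exact rk_lt_iff nums x y
    (List.mem_of_mem_drop (List.mem_of_mem_take hx))
    (List.mem_of_mem_drop (List.mem_of_mem_take hy))

theorem Bfold (nums : List Int) (kN : ℕ) :
    ∀ q : ℕ, q + kN ≤ nums.length →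
      List.foldl min (windowInv nums (kN:Int) 0)
        ((PySem.List.pyRange 1 ((q:Int) + 1) 1).map (fun s => windowInv nums (kN:Int) s))
      = minsOf (ranksOf nums) kN q := by
  intro q
  induction q with
  | zero =>
    intro h
    rw [show (((0:ℕ)):Int) + 1 = (1:Int) from by norm_num]
    rw [PySem.List.pyRange_one_eq_nil (le_refl _), List.map_nil, List.foldl_nil]
    rw [show ((0:Int)) = (((0:ℕ)):Int) from rfl, windowInv_eq nums kN 0 (by omega)]
    rfl
  | succ q ih =>
    intro h
    have hsucc : PySem.List.pyRange 1 ((((q+1:ℕ)):Int) + 1) 1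
        = PySem.List.pyRange 1 (((q+1:ℕ)):Int) 1 ++ [(((q+1:ℕ)):Int)] :=
      PySem.List.pyRange_one_succ_right (by push_cast; omega)
    rw [hsucc, List.map_append, List.foldl_append]
    rw [show (((q+1:ℕ)):Int) = ((q:Int)) + 1 from by push_cast; ring]
    rw [ih (by omega)]
    simp only [List.map_cons, List.map_nil, List.foldl_cons, List.foldl_nil]
    rw [show ((q:Int)) + 1 = (((q+1:ℕ)):Int) from by push_cast; ring]
    rw [windowInv_eq nums kN (q+1) (by omega)]
    rfl


theorem main_pos (nums : List Int) (k : Int) (hk1 : 1 ≤ k) (hkn : k ≤ (nums.length:Int)) :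
    minInversionCount nums k = minInversionCount_alt nums k := by
  have hkcast : ((k.toNat:ℕ):Int) = k := by omega
  have hmnn : (0:Int) ≤ ((suOf nums).length : Int) := by positivity
  have hRlen : (ranksOf nums).length = nums.length := ranks_length nums
  have hRb : ∀ r ∈ ranksOf nums, 1 ≤ r ∧ r ≤ ((suOf nums).length : Int) := ranks_bounds nums
  have hkNlen : k.toNat ≤ (ranksOf nums).length := by rw [hRlen]; omega
  obtain ⟨l11, l12⟩ := loop1_inv (ranksOf nums) ((suOf nums).length : Int) hmnn hRb k.toNat hkNlen
  have hB : minInversionCount_alt nums k =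
      (PySem.List.min? ((PySem.List.pyRange 0 ((nums.length:Int) - k + 1) 1).map
        (fun s => windowInv nums k s)) (fun v => v)).getD 0 := rfl
  rw [portA_char nums k, hB]
  rw [← hkcast]
  rw [show ((nums.length:ℕ):Int) - ((k.toNat:ℕ):Int) + 1 = (((nums.length - k.toNat : ℕ)):Int) + 1 from by push_cast; omega]
  rw [show ((nums.length:ℕ):Int) = ((k.toNat:ℕ):Int) + (((nums.length - k.toNat : ℕ)):Int) from by push_cast; omega]
  obtain ⟨_, l22, _⟩ := loop2_inv (ranksOf nums) ((suOf nums).length:Int) k.toNat (by omega) hRb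
    ((loop1A (ranksOf nums) ((suOf nums).length:Int) ((k.toNat:ℕ):Int)).1,
     (loop1A (ranksOf nums) ((suOf nums).length:Int) ((k.toNat:ℕ):Int)).1,
     (loop1A (ranksOf nums) ((suOf nums).length:Int) ((k.toNat:ℕ):Int)).2)
    (by rw [win_zero]; exact l11)
    (by show _ = minsOf _ _ 0; rw [show minsOf (ranksOf nums) k.toNat 0 = invCnt (winOf (ranksOf nums) k.toNat 0) from rfl, win_zero]; exact l11)
    (by rw [win_zero]; exact l12)
    (nums.length - k.toNat) (by omega)
  rw [l22]
  have hcons := PySem.List.pyRange_one_cons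
    (a := (0:Int)) (b := (((nums.length - k.toNat : ℕ)):Int) + 1) (by positivity)
  rw [hcons, List.map_cons, PySem.List.min?_id_cons, Option.getD_some]
  rw [show (0:Int) + 1 = 1 from by norm_num]
  rw [show windowInv nums ((k.toNat:ℕ):Int) 0 = invCnt (winOf (ranksOf nums) k.toNat 0) from
        windowInv_eq nums k.toNat 0 (by omega)]
  rw [show invCnt (winOf (ranksOf nums) k.toNat 0) = windowInv nums ((k.toNat:ℕ):Int) 0 from
        (windowInv_eq nums k.toNat 0 (by omega)).symm]
  exact (Bfold nums k.toNat (nums.length - k.toNat) (by omega)).symm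

theorem main_zero (nums : List Int) : minInversionCount nums 0 = minInversionCount_alt nums 0 := by
  have hmnn : (0:Int) ≤ ((suOf nums).length : Int) := by positivity
  have hRlen : (ranksOf nums).length = nums.length := ranks_length nums
  have hRb : ∀ r ∈ ranksOf nums, 1 ≤ r ∧ r ≤ ((suOf nums).length : Int) := ranks_bounds nums
  have h1 : loop1A (ranksOf nums) ((suOf nums).length:Int) 0
      = (0, PySem.List.pyRepeat [0] (((suOf nums).length:Int) + 1)) := by
    unfold loop1A
    rw [PySem.List.pyRange_one_eq_nil (le_refl _), List.foldl_nil]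
  obtain ⟨_, z2, _⟩ := loop2_zero (ranksOf nums) ((suOf nums).length:Int) hmnn hRb
    (0, 0, PySem.List.pyRepeat [0] (((suOf nums).length:Int) + 1)) rfl rfl
    (by exact bitrep_init ((suOf nums).length:Int) hmnn)
    nums.length (by omega)
  have hB : minInversionCount_alt nums 0 =
      (PySem.List.min? ((PySem.List.pyRange 0 ((nums.length:Int) - 0 + 1) 1).map
        (fun s => windowInv nums 0 s)) (fun v => v)).getD 0 := rfl
  have hw0 : ∀ s : Int, windowInv nums 0 s = 0 := by
    intro s
    rw [windowInv, show s + (0:Int) = s from by ring, PySem.List.pyRange_one_eq_nil (le_refl _)]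
    rfl
  rw [portA_char nums 0, hB, h1]
  rw [z2]
  rw [show (nums.length:Int) - 0 + 1 = ((nums.length:ℕ):Int) + 1 from by ring]
  have hcons := PySem.List.pyRange_one_cons
    (a := (0:Int)) (b := ((nums.length:ℕ):Int) + 1) (by positivity)
  rw [hcons, List.map_cons, PySem.List.min?_id_cons, Option.getD_some]
  rw [hw0 0]
  rw [fold_min_self _ 0 ?_]
  intro x hx
  obtain ⟨sv, _, hsv⟩ := List.mem_map.mp hx
  rw [← hsv, hw0 sv]

-- ===== VERDICT (by name: the statement is the Claim_ definition above) =====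
theorem minInversionCount_spec : Claim_equal_minInversionCount := by
  intro nums k _ hpre
  unfold Spec_minInversionCount
  unfold Pre_minInversionCount at hpre
  obtain ⟨hk0, hkn⟩ := hpre
  by_cases hk : k = 0
  · subst hk
    exact main_zero nums
  · exact main_pos nums k (by omega) hkn
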